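-- pv_equiv track=rewrite | github.com/MrHoux/Multi-agent-NER | src/maner/orchestrator/pipeline.py | _is_compact_symbol_token
-- ===== SOURCE A (Python) =====
-- def _is_compact_symbol_token(text: str) -> bool:
--     token = text.strip()
--     if not token or " " in token:
--         return False
--     if len(token) > 16:
--         return False
--     has_alpha = any(ch.isalpha() for ch in token)
--     has_digit = any(ch.isdigit() for ch in token)
--     has_upper = any(ch.isupper() for ch in token)
--     return has_alpha and (has_digit or has_upper)
-- ===== SOURCE B (Python) =====
-- def _is_compact_symbol_token(text: str) -> bool:
--     token = text.strip()
--     if not (0 < len(token) <= 16) or " " in token: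
--         return False
--     # has_alpha and (has_digit or has_upper) == has_upper or (has_alpha and has_digit),
--     # since every uppercase character is alphabetic: return True as soon as an
--     # uppercase character appears; otherwise require both a letter and a digit.
--     saw_alpha = False
--     saw_digit = False
--     for ch in token:
--         if ch.isupper():
--             return True
--         if ch.isalpha():
--             saw_alpha = True
--         elif ch.isdigit():
--             saw_digit = True
--     return saw_alpha and saw_digit
-- ===== Notes on version B (the rewrite author's own statement) =====
-- stated objective: alternative
-- what changed: B rewrites the acceptance condition via the identity has_alpha and (has_digit or has_upper) == has_upper or (has_alpha and has_digit) (uppercase implies alphabetic) and decides it in one early-exit scan that returns True at the first uppercase character, instead of A's four full any() scans combined afterwards.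
import Mathlib
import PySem

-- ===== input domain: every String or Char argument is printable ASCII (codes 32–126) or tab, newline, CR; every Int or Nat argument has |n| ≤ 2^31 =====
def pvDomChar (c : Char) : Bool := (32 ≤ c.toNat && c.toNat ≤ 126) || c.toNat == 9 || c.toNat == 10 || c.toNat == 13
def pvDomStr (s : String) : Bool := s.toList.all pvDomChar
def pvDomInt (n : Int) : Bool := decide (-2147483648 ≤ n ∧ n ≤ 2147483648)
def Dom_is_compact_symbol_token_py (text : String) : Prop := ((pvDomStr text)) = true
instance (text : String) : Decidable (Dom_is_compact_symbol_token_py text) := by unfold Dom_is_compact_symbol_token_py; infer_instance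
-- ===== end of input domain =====

-- B decides acceptance via the identity has_alpha && (has_digit || has_upper) =
-- has_upper || (has_alpha && has_digit) (uppercase implies alphabetic) in one
-- early-exit scan, instead of A's four separate any() scans combined afterwards.

-- ===== PORT A =====
def is_compact_symbol_token_py (text : String) : Bool :=
  let token := PySem.Str.strip text
  if token.toList.isEmpty || PySem.Str.isIn " " token then false
  else if PySem.Str.len token > 16 then false
  else
    let has_alpha := token.toList.any PySem.Chars.isalpha
    let has_digit := token.toList.any PySem.Chars.isdigit
    let has_upper := token.toList.any PySem.Chars.isupper
    has_alpha && (has_digit || has_upper)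

-- ===== PORT B =====
-- early-exit scan: true at the first uppercase char; else need a letter and a digit
def altScan : List Char → Bool → Bool → Bool
  | [], sawAlpha, sawDigit => sawAlpha && sawDigit
  | ch :: rest, sawAlpha, sawDigit =>
    if PySem.Chars.isupper ch then true
    else if PySem.Chars.isalpha ch then altScan rest true sawDigit
    else if PySem.Chars.isdigit ch then altScan rest sawAlpha true
    else altScan rest sawAlpha sawDigit

def is_compact_symbol_token_py_alt (text : String) : Bool :=
  let token := PySem.Str.strip text
  if !(0 < PySem.Str.len token ∧ PySem.Str.len token ≤ 16) || PySem.Str.isIn " " token then false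
  else altScan token.toList false false

-- ===== PRECONDITION & SPEC =====
def Spec_is_compact_symbol_token_py (text : String) (out : Bool) : Prop := out = is_compact_symbol_token_py_alt text
instance (text : String) (out : Bool) : Decidable (Spec_is_compact_symbol_token_py text out) := by unfold Spec_is_compact_symbol_token_py; infer_instance

-- ===== CLAIM (what is proved, stated in full; the proofs are below) =====
def Claim_equal_is_compact_symbol_token_py : Prop := ∀ (text : String), Dom_is_compact_symbol_token_py text → Spec_is_compact_symbol_token_py text (is_compact_symbol_token_py text)

-- ===== LEMMAS AND PROOFS =====
theorem alpha_not_digit (c : Char) (h : PySem.Chars.isalpha c = true) :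
    PySem.Chars.isdigit c = false := by
  simp [PySem.Chars.isalpha, PySem.Chars.isupper, PySem.Chars.islower, Char.le_def, UInt32.le_iff_toNat_le] at h
  simp [PySem.Chars.isdigit, Char.le_def, UInt32.le_iff_toNat_le] at *
  rcases h with ⟨h1,h2⟩|⟨h1,h2⟩ <;> omega

theorem isupper_imp_isalpha (c : Char) (h : PySem.Chars.isupper c = true) :
    PySem.Chars.isalpha c = true := by
  simp [PySem.Chars.isalpha, h]

theorem altScan_eq (l : List Char) (a d : Bool) :
    altScan l a d
      = (l.any PySem.Chars.isupper
         || ((a || l.any PySem.Chars.isalpha) && (d || l.any PySem.Chars.isdigit))) := by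
  induction l generalizing a d with
  | nil => simp [altScan]
  | cons ch rest ih =>
    by_cases hu : PySem.Chars.isupper ch = true
    · simp [altScan, hu]
    · have hu' : PySem.Chars.isupper ch = false := by simpa using hu
      by_cases ha : PySem.Chars.isalpha ch = true
      · simp [altScan, hu', ha, ih, alpha_not_digit ch ha]
      · have ha' : PySem.Chars.isalpha ch = false := by simpa using ha
        by_cases hd : PySem.Chars.isdigit ch = true
        · simp [altScan, hu', ha', hd, ih]
        · have hd' : PySem.Chars.isdigit ch = false := by simpa using hd
          simp [altScan, hu', ha', hd', ih]

theorem any_upper_imp_any_alpha (l : List Char) (h : l.any PySem.Chars.isupper = true) :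
    l.any PySem.Chars.isalpha = true := by
  rcases List.any_eq_true.mp h with ⟨c, hc, hcu⟩
  exact List.any_eq_true.mpr ⟨c, hc, isupper_imp_isalpha c hcu⟩

-- ===== VERDICT (by name: the statement is the Claim_ definition above) =====
theorem is_compact_symbol_token_py_spec : Claim_equal_is_compact_symbol_token_py := by
  intro text _
  unfold Spec_is_compact_symbol_token_py is_compact_symbol_token_py is_compact_symbol_token_py_alt
  simp [altScan_eq]
  generalize PySem.Chars.strip text.toList = l
  by_cases hu : l.any PySem.Chars.isupper = true
  · simp [hu, any_upper_imp_any_alpha l hu]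
    ac_rfl
  · have hu' : l.any PySem.Chars.isupper = false := by simpa using hu
    simp [hu']
    ac_rfl
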